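-- pv_equiv track=rewrite | github.com/Bindrya/algoritm | lab10/aggregate_analysis.py | aggregate_analysis
-- ===== SOURCE A (Python) =====
-- def aggregate_analysis(operations):
--     total_cost = 0
--     for i, op in enumerate(operations, 1):
--         if i == 2 ** int(i.bit_length() - 1):  # Powers of 2 (i.e., 1, 2, 4, 8, 16, ...)
--             total_cost += 2 ** (i.bit_length() - 1)  # Cost of powers of 2
--         else:
--             total_cost += 1  # Cost for other operations
--     return total_cost
-- ===== SOURCE B (Python) =====
-- def aggregate_analysis(operations):
--     n = len(operations)
--     if n == 0:
--         return 0
--     k = n.bit_length() - 1  # floor(log2(n))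
--     # positions 1..n: the k+1 powers of two cost their value (sum 2**(k+1)-1),
--     # the remaining n-(k+1) positions cost 1 each
--     return (n - (k + 1)) + (2 ** (k + 1) - 1)
-- ===== Notes on version B (the rewrite author's own statement) =====
-- stated objective: faster
-- what changed: Replaces the per-element loop with a closed form: the sum is n-(k+1) ones plus the geometric sum 2^(k+1)-1 of the k+1 powers of two up to n=len(operations), k=floor(log2 n).
import Mathlib
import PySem

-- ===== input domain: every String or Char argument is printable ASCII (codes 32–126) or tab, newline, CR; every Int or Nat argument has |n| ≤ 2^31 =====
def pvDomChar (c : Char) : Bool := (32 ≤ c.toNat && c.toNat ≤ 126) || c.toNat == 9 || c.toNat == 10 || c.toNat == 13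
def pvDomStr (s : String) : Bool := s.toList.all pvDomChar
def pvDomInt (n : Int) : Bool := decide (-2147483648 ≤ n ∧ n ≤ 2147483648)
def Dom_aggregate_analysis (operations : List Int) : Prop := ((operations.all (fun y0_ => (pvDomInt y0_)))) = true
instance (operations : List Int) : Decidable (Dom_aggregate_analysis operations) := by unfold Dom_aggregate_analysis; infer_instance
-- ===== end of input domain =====

-- B replaces A's per-element loop by a closed form over n = len(operations):
-- the k+1 powers of two ≤ n contribute 2^(k+1)-1 and the other n-(k+1) positions 1 each.

-- ===== PORT A =====

-- exact port of Python int.bit_length (number of bits of |i|)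
def pyBitLength (i : Int) : Int := (i.natAbs.size : Int)

-- the for-loop of A: index i starts at 1 (enumerate(operations, 1)), so
-- pyBitLength i - 1 ≥ 0 whenever the body runs and .toNat is exact there
def aggLoop : List Int → Int → Int → Int
  | [], _, total => total
  | _ :: rest, i, total =>
      aggLoop rest (i + 1)
        (total + if i = (2 : Int) ^ (pyBitLength i - 1).toNat
                 then (2 : Int) ^ (pyBitLength i - 1).toNat else 1)

def aggregate_analysis (operations : List Int) : Int :=
  aggLoop operations 1 0

-- ===== PORT B =====

def aggregate_analysis_alt (operations : List Int) : Int :=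
  let n := operations.length
  if n = 0 then 0
  else
    let k := Nat.size n - 1     -- n.bit_length() - 1 = floor(log2 n), n ≥ 1
    ((n : Int) - (k + 1)) + ((2 : Int) ^ (k + 1) - 1)

-- ===== PRECONDITION & SPEC =====
def Spec_aggregate_analysis (operations : List Int) (out : Int) : Prop := out = aggregate_analysis_alt operations
instance (operations : List Int) (out : Int) : Decidable (Spec_aggregate_analysis operations out) := by unfold Spec_aggregate_analysis; infer_instance

-- ===== CLAIM (what is proved, stated in full; the proofs are below) =====
def Claim_equal_aggregate_analysis : Prop := ∀ (operations : List Int), Dom_aggregate_analysis operations → Spec_aggregate_analysis operations (aggregate_analysis operations)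

-- ===== LEMMAS AND PROOFS =====

-- cost added by A's loop body at index i
def costI (i : Int) : Int :=
  if i = (2 : Int) ^ (pyBitLength i - 1).toNat
  then (2 : Int) ^ (pyBitLength i - 1).toNat else 1

-- total cost of n consecutive indices starting at i
def G : Nat → Int → Int
  | 0, _ => 0
  | n + 1, i => costI i + G n (i + 1)

theorem aggLoop_eq (xs : List Int) : ∀ (i t : Int), aggLoop xs i t = t + G xs.length i := by
  induction xs with
  | nil => intro i t; simp [aggLoop, G]
  | cons x rest ih =>
      intro i t
      simp only [aggLoop, List.length_cons, G, ih, costI]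
      ring

theorem G_succ : ∀ (n : Nat) (i : Int), G (n + 1) i = G n i + costI (i + n) := by
  intro n
  induction n with
  | zero => intro i; simp [G]
  | succ n ih =>
      intro i
      show costI i + G (n + 1) (i + 1) = (costI i + G n (i + 1)) + costI (i + ((n + 1 : Nat) : Int))
      rw [ih]
      have h : (i + 1) + (n : Int) = i + ((n + 1 : Nat) : Int) := by push_cast; ring
      rw [h]
      ring

theorem size_eq_log2 (n : Nat) (h : n ≠ 0) : Nat.size n = Nat.log2 n + 1 :=
  le_antisymm (Nat.size_le.mpr Nat.lt_log2_self) (Nat.lt_size.mpr (Nat.log2_self_le h))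

theorem log2_eq_of {m a : Nat} (h1 : 2 ^ a ≤ m) (h2 : m < 2 ^ (a + 1)) : Nat.log2 m = a := by
  rw [Nat.log2_eq_log_two]; exact Nat.log_eq_of_pow_le_of_lt_pow h1 h2

theorem costI_nat (m : Nat) (h : m ≠ 0) :
    costI (m : Int) =
      ((if m = 2 ^ Nat.log2 m then (2 : Nat) ^ Nat.log2 m else 1 : Nat) : Int) := by
  have hb : pyBitLength (m : Int) = (Nat.size m : Int) := by
    simp [pyBitLength]
  have he : (pyBitLength (m : Int) - 1).toNat = Nat.log2 m := by
    rw [hb, size_eq_log2 m h]; push_cast; omega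
  have hcond : ((m : Int) = (2 : Int) ^ Nat.log2 m) ↔ (m = 2 ^ Nat.log2 m) := by
    constructor
    · intro hc; exact_mod_cast hc
    · intro hc; exact_mod_cast hc
  simp only [costI, he]
  by_cases hc : m = 2 ^ Nat.log2 m
  · rw [if_pos (hcond.mpr hc), if_pos hc]; push_cast; ring
  · rw [if_neg (fun hx => hc (hcond.mp hx)), if_neg hc]; norm_num

-- closed form for the total cost of indices 1..n
def closed (n : Nat) : Int :=
  if n = 0 then 0
  else ((n : Int) - (Nat.log2 n + 1)) + ((2 : Int) ^ (Nat.log2 n + 1) - 1)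

theorem G_closed : ∀ n : Nat, G n 1 = closed n := by
  intro n
  induction n with
  | zero => simp [G, closed]
  | succ n ih =>
      have hstep : G (n + 1) 1 = G n 1 + costI ((n + 1 : Nat) : Int) := by
        have : (1 : Int) + (n : Int) = ((n + 1 : Nat) : Int) := by push_cast; ring
        rw [G_succ, this]
      rcases Nat.eq_zero_or_pos n with hn0 | hn1
      · subst hn0; decide
      · have hn : n ≠ 0 := by omega
        have hk1 : 2 ^ Nat.log2 n ≤ n := Nat.log2_self_le hn
        have hk2 : n < 2 ^ (Nat.log2 n + 1) := Nat.lt_log2_self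
        rw [hstep, ih, costI_nat _ (by omega)]
        by_cases hp : n + 1 = 2 ^ Nat.log2 (n + 1)
        · -- n+1 is a power of two
          set j := Nat.log2 (n + 1) with hj
          have hj1 : 1 ≤ j := by
            by_contra h
            have hz : j = 0 := by omega
            rw [hz] at hp; simp at hp; omega
          obtain ⟨m, hm⟩ : ∃ m, j = m + 1 := ⟨j - 1, by omega⟩
          rw [hm] at hp hj1 ⊢
          have hlogn : Nat.log2 n = m := by
            apply log2_eq_of
            · have h2 : 2 ^ m < 2 ^ (m + 1) := Nat.pow_lt_pow_right (by norm_num) (by omega)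
              omega
            · have h1 : 1 ≤ 2 ^ (m + 1) := Nat.one_le_two_pow
              omega
          rw [if_pos hp]
          simp only [closed, hlogn, ← hj, hm]
          rw [if_neg hn, if_neg (by omega : n + 1 ≠ 0)]
          have hcast : (n : Int) = 2 ^ (m + 1) - 1 := by
            have h1 : 1 ≤ 2 ^ (m + 1) := Nat.one_le_two_pow
            have : n = 2 ^ (m + 1) - 1 := by omega
            rw [this]; push_cast [h1]; ring
          push_cast [pow_succ]
          rw [hcast]
          push_cast [pow_succ]
          ring
        · -- n+1 is not a power of two: log2 does not move
          rw [if_neg hp]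
          have hlt : n + 1 < 2 ^ (Nat.log2 n + 1) := by
            rcases Nat.lt_or_ge (n + 1) (2 ^ (Nat.log2 n + 1)) with h | h
            · exact h
            · exfalso
              have heq : n + 1 = 2 ^ (Nat.log2 n + 1) := by omega
              apply hp; rw [heq, Nat.log2_two_pow]
          have hlog : Nat.log2 (n + 1) = Nat.log2 n := log2_eq_of (by omega) hlt
          simp only [closed, hlog]
          rw [if_neg hn, if_neg (by omega : n + 1 ≠ 0)]
          push_cast; ring

-- ===== VERDICT (by name: the statement is the Claim_ definition above) =====
theorem aggregate_analysis_spec : Claim_equal_aggregate_analysis := by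
  intro operations _
  unfold Spec_aggregate_analysis aggregate_analysis aggregate_analysis_alt
  rw [aggLoop_eq, G_closed, closed]
  rcases Nat.eq_zero_or_pos operations.length with h0 | hpos
  · simp [h0]
  · have hne : operations.length ≠ 0 := by omega
    rw [if_neg hne]
    simp only [if_neg hne, size_eq_log2 _ hne]
    push_cast
    ring
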